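-- pv_equiv track=rewrite | github.com/santhoshraj2960/Leetcode | google_specific/the_celebrity_problem.py | get_celebrity_in_party
-- ===== SOURCE A (Python) =====
-- from collections import defaultdict
--
-- def get_celebrity_in_party(mat):
--     num_of_people_at_party = len(mat)
--     num_of_people_who_knows_person_i_dict = defaultdict(int)
--     possible_celebs_list = []
--
--     for i in range(len(mat)):
--
--         num_of_people_i_knows = 0
--
--         for j in range(len(mat[0])):
--             if mat[i][j] == 1:
--                 num_of_people_who_knows_person_i_dict[j] += 1
--                 num_of_people_i_knows += 1
--
--         if num_of_people_i_knows == 0: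
--             possible_celebs_list.append(i)
--
--     for person in possible_celebs_list:
--         # ******* NOTE '-1' in the following line *****
--         if num_of_people_who_knows_person_i_dict[person] == num_of_people_at_party - 1:
--             return person
--
--     return -1
-- ===== SOURCE B (Python) =====
-- def get_celebrity_in_party(mat):
--     # Candidate elimination, then one verification pass: O(n + m) reads
--     # instead of scanning the whole matrix.
--     n = len(mat)
--     m = len(mat[0]) if mat else 0
--
--     def knows(i, j):
--         return j < m and mat[i][j] == 1
--
--     cand = 0
--     for i in range(1, n):
--         if knows(cand, i):
--             cand = i
--
--     if any(knows(cand, j) for j in range(m)):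
--         return -1
--     if sum(1 for r in range(n) if knows(r, cand)) != n - 1:
--         return -1
--     return cand
-- ===== Notes on version B (the rewrite author's own statement) =====
-- stated objective: faster
-- what changed: Replaces the full n*m matrix scan with dict counting by candidate elimination (one pass narrowing to a single candidate) followed by a single verification of that candidate's row and column.
import Mathlib
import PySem

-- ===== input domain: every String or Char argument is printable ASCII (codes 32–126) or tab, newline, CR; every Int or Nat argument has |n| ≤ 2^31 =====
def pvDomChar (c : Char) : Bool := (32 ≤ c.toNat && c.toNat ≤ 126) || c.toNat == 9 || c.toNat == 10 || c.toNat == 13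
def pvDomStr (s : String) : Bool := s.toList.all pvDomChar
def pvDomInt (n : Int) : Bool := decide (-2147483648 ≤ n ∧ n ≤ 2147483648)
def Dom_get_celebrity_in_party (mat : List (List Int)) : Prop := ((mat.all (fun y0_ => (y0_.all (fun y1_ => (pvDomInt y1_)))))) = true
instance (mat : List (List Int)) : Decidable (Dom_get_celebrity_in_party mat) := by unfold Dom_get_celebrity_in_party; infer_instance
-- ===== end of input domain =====

-- B replaces A's full n*m scan (column counts in a dict + candidate list) by
-- candidate elimination and a single verification pass (objective: faster).

-- ===== PORT A =====
-- the final 'for person in possible_celebs_list: if …: return person' loop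
def pvScanCelebs (d : PySem.Dict Int Int) (n : Int) : List Int → Int
  | [] => -1
  | p :: rest => if d.getD p 0 = n - 1 then p else pvScanCelebs d n rest

def get_celebrity_in_party (mat : List (List Int)) : Int :=
  let n : Int := mat.length
  let m : Nat := ((PySem.List.pyGet? mat 0).getD []).length  -- len(mat[0]); only reached when mat ≠ [] (Pre_ excludes short rows)
  let st := (List.range mat.length).foldl
    (fun (st : PySem.Dict Int Int × List Int) i =>
      let row := mat.getD i []
      let inner := (List.range m).foldl
        (fun (st2 : PySem.Dict Int Int × Int) j =>
          if row.getD j 0 == 1 then (st2.1.modify (j : Int) 0 (· + 1), st2.2 + 1) else st2)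
        (st.1, (0 : Int))
      if inner.2 = 0 then (inner.1, st.2 ++ [(i : Int)]) else (inner.1, st.2))
    (PySem.Dict.empty, [])
  pvScanCelebs st.1 n st.2

-- ===== PORT B =====
def pvKnows (mat : List (List Int)) (m : Nat) (i j : Nat) : Bool :=
  decide (j < m) && ((mat.getD i []).getD j 0 == 1)

def get_celebrity_in_party_alt (mat : List (List Int)) : Int :=
  let n : Nat := mat.length
  let m : Nat := ((PySem.List.pyGet? mat 0).getD []).length  -- len(mat[0]) if mat else 0 (exact: getD [] on empty)
  let cand : Nat := (List.range' 1 (n - 1)).foldl (fun c i => if pvKnows mat m c i then i else c) 0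
  if (List.range m).any (fun j => pvKnows mat m cand j) then -1
  else if ((List.range n).countP (fun r => pvKnows mat m r cand) : Int) ≠ (n : Int) - 1 then -1
  else (cand : Int)

-- ===== PRECONDITION & SPEC =====
-- Pre_ excludes exactly the inputs where A raises IndexError: a non-empty
-- matrix with a row shorter than the first row.
def Pre_get_celebrity_in_party (mat : List (List Int)) : Prop :=
  ∀ row ∈ mat, (mat.headI).length ≤ row.length
instance (mat : List (List Int)) : Decidable (Pre_get_celebrity_in_party mat) := by
  unfold Pre_get_celebrity_in_party; infer_instance

def pvWitness_get_celebrity_in_party : List (List Int) := [[0, 1], [0, 0]]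

def Spec_get_celebrity_in_party (mat : List (List Int)) (out : Int) : Prop := out = get_celebrity_in_party_alt mat
instance (mat : List (List Int)) (out : Int) : Decidable (Spec_get_celebrity_in_party mat out) := by unfold Spec_get_celebrity_in_party; infer_instance

-- ===== CLAIM (what is proved, stated in full; the proofs are below) =====
def Claim_equal_get_celebrity_in_party : Prop := ∀ (mat : List (List Int)), Dom_get_celebrity_in_party mat → Pre_get_celebrity_in_party mat → Spec_get_celebrity_in_party mat (get_celebrity_in_party mat)

-- ===== LEMMAS AND PROOFS =====

-- abbreviations used only in the proofs
def pvCnt (mat : List (List Int)) (m : Nat) (j : Nat) : Nat :=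
  (List.range mat.length).countP (fun r => pvKnows mat m r j)

def pvIsC (mat : List (List Int)) (m : Nat) (i : Nat) : Bool :=
  (List.range m).all (fun j => !((mat.getD i []).getD j 0 == 1))

theorem pvIsC_iff (mat : List (List Int)) (m i : Nat) :
    pvIsC mat m i = true ↔ ∀ j, pvKnows mat m i j = false := by
  constructor
  · intro h j
    by_cases hj : j < m
    · have := List.all_eq_true.mp h j (List.mem_range.mpr hj)
      simp [pvKnows]
      intro _
      simpa using this
    · simp [pvKnows, hj]
  · intro h
    refine List.all_eq_true.mpr (fun j hj => ?_)
    have := h j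
    simp [pvKnows, List.mem_range.mp hj] at this
    simpa using this

-- A's inner loop over one row, as a pair
theorem pv_inner (row : List Int) (l : List Nat) (d : PySem.Dict Int Int) (c : Int) :
    l.foldl
      (fun (st2 : PySem.Dict Int Int × Int) j =>
        if row.getD j 0 == 1 then (st2.1.modify (j : Int) 0 (· + 1), st2.2 + 1) else st2)
      (d, c)
    = ((((l.filter (fun j => row.getD j 0 == 1)).map (fun (j : Nat) => (j : Int))).foldl
          (fun d x => d.modify x 0 (· + 1)) d),
        c + (l.countP (fun j => row.getD j 0 == 1) : Int)) := by
  induction l generalizing d c with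
  | nil => simp
  | cons x t ih =>
    by_cases hx : (row.getD x 0 == 1) = true
    · rw [List.foldl_cons, if_pos hx, ih,
        List.filter_cons_of_pos (p := fun j => row.getD j 0 == 1) (l := t) hx,
        List.countP_cons_of_pos (p := fun j => row.getD j 0 == 1) (l := t) hx]
      refine Prod.ext rfl ?_
      push_cast; ring
    · rw [List.foldl_cons, if_neg hx, ih,
        List.filter_cons_of_neg (p := fun j => row.getD j 0 == 1) (l := t) hx,
        List.countP_cons_of_neg (p := fun j => row.getD j 0 == 1) (l := t) hx]

theorem pv_count_cast (l : List Nat) (j : Nat) :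
    (l.map (fun (j : Nat) => (j : Int))).count (j : Int) = l.count j := by
  exact List.count_map_of_injective (α := Nat) (β := Int) l (fun (j : Nat) => (j : Int)) (fun a b h => by simpa using h) j

-- dict value after one row's updates, at a Nat key
theorem pv_row_getD (mat : List (List Int)) (m i j₀ : Nat) (d : PySem.Dict Int Int) :
    (((((List.range m).filter (fun j => (mat.getD i []).getD j 0 == 1)).map (fun (j : Nat) => (j : Int))).foldl
        (fun d x => d.modify x 0 (· + 1)) d)).getD (j₀ : Int) 0
    = d.getD (j₀ : Int) 0 + (if pvKnows mat m i j₀ then 1 else 0) := by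
  rw [PySem.Dict.getD_foldl_modify_add_one, pv_count_cast]
  have hcnt : List.count j₀ ((List.range m).filter (fun j => (mat.getD i []).getD j 0 == 1))
      = if pvKnows mat m i j₀ then 1 else 0 := by
    by_cases hk : pvKnows mat m i j₀ = true
    · rw [if_pos hk]
      simp only [pvKnows, Bool.and_eq_true, decide_eq_true_eq] at hk
      exact List.count_eq_one_of_mem ((List.nodup_range).filter _)
        (List.mem_filter.mpr ⟨List.mem_range.mpr hk.1, hk.2⟩)
    · rw [if_neg hk]
      refine List.count_eq_zero_of_not_mem (fun hmem => hk ?_)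
      rcases List.mem_filter.mp hmem with ⟨h1, h2⟩
      simp [pvKnows, List.mem_range.mp h1]
      simpa using h2
  rw [hcnt]
  by_cases hk : pvKnows mat m i j₀ = true <;> simp [hk]


-- one outer-loop step, in closed form
theorem pv_step (mat : List (List Int)) (m : Nat) (d : PySem.Dict Int Int) (cs : List Int) (x : Nat) :
    (if ((List.range m).foldl
          (fun (st2 : PySem.Dict Int Int × Int) j =>
            if (mat.getD x []).getD j 0 == 1 then (st2.1.modify (j : Int) 0 (· + 1), st2.2 + 1) else st2)
          (d, (0 : Int))).2 = 0
     then (((List.range m).foldl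
          (fun (st2 : PySem.Dict Int Int × Int) j =>
            if (mat.getD x []).getD j 0 == 1 then (st2.1.modify (j : Int) 0 (· + 1), st2.2 + 1) else st2)
          (d, (0 : Int))).1, cs ++ [(x : Int)])
     else (((List.range m).foldl
          (fun (st2 : PySem.Dict Int Int × Int) j =>
            if (mat.getD x []).getD j 0 == 1 then (st2.1.modify (j : Int) 0 (· + 1), st2.2 + 1) else st2)
          (d, (0 : Int))).1, cs))
    = (((((List.range m).filter (fun j => (mat.getD x []).getD j 0 == 1)).map (fun (j : Nat) => (j : Int))).foldl
          (fun d x => d.modify x 0 (· + 1)) d),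
       if pvIsC mat m x then cs ++ [(x : Int)] else cs) := by
  have hiff : ((0 : Int) + ((List.range m).countP (fun j => (mat.getD x []).getD j 0 == 1) : Int) = 0)
      ↔ pvIsC mat m x = true := by
    rw [zero_add]
    constructor
    · intro h
      have h0 : (List.range m).countP (fun j => (mat.getD x []).getD j 0 == 1) = 0 := by
        exact_mod_cast h
      rw [List.countP_eq_zero] at h0
      exact List.all_eq_true.mpr (fun j hj => by simpa using h0 j hj)
    · intro h
      have h0 : (List.range m).countP (fun j => (mat.getD x []).getD j 0 == 1) = 0 :=
        List.countP_eq_zero.mpr (fun j hj => by simpa using List.all_eq_true.mp h j hj)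
      exact_mod_cast h0
  rw [pv_inner]
  by_cases hc : pvIsC mat m x = true
  · rw [if_pos (hiff.mpr hc), if_pos hc]
  · rw [if_neg (fun h => hc (hiff.mp h)), if_neg (by simpa using hc)]

-- A's outer loop: the dict counts columns, the list collects the no-1 rows
theorem pv_outer (mat : List (List Int)) (m : Nat) (l : List Nat) (d : PySem.Dict Int Int) (cs : List Int) :
    (∀ j₀ : Nat,
      (l.foldl
        (fun (st : PySem.Dict Int Int × List Int) i =>
          let row := mat.getD i []
          let inner := (List.range m).foldl
            (fun (st2 : PySem.Dict Int Int × Int) j =>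
              if row.getD j 0 == 1 then (st2.1.modify (j : Int) 0 (· + 1), st2.2 + 1) else st2)
            (st.1, (0 : Int))
          if inner.2 = 0 then (inner.1, st.2 ++ [(i : Int)]) else (inner.1, st.2))
        (d, cs)).1.getD (j₀ : Int) 0
      = d.getD (j₀ : Int) 0 + (l.countP (fun i => pvKnows mat m i j₀) : Int))
    ∧ (l.foldl
        (fun (st : PySem.Dict Int Int × List Int) i =>
          let row := mat.getD i []
          let inner := (List.range m).foldl
            (fun (st2 : PySem.Dict Int Int × Int) j =>
              if row.getD j 0 == 1 then (st2.1.modify (j : Int) 0 (· + 1), st2.2 + 1) else st2)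
            (st.1, (0 : Int))
          if inner.2 = 0 then (inner.1, st.2 ++ [(i : Int)]) else (inner.1, st.2))
        (d, cs)).2
      = cs ++ (l.filter (fun i => pvIsC mat m i)).map (fun (i : Nat) => (i : Int)) := by
  induction l generalizing d cs with
  | nil => simp
  | cons x t ih =>
    simp only [List.foldl_cons]
    rw [pv_step mat m d cs x]
    refine ⟨fun j₀ => ?_, ?_⟩
    · rw [(ih _ _).1 j₀, pv_row_getD, List.countP_cons]
      split_ifs <;> push_cast <;> ring
    · rw [(ih _ _).2, List.filter_cons]
      by_cases hc : pvIsC mat m x = true <;> simp [hc]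

-- A's final scan over the cast candidate indices, as find?
theorem pv_scan (d : PySem.Dict Int Int) (n : Int) (l : List Nat) (f : Nat → Int)
    (hf : ∀ i ∈ l, d.getD (i : Int) 0 = f i) :
    pvScanCelebs d n (l.map (fun (i : Nat) => (i : Int)))
    = (match l.find? (fun i => decide (f i = n - 1)) with
       | some i => (i : Int)
       | none => -1) := by
  induction l with
  | nil => simp [pvScanCelebs]
  | cons x t ih =>
    have hx := hf x List.mem_cons_self
    by_cases h : f x = n - 1
    · simp [pvScanCelebs, hx, h]
    · simp [pvScanCelebs, hx, h, ih (fun i hi => hf i (List.mem_cons_of_mem _ hi))]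

theorem pv_countP_not (l : List Nat) (p : Nat → Bool) :
    l.countP p + l.countP (fun x => !(p x)) = l.length := by
  induction l with
  | nil => simp
  | cons x t ih =>
    by_cases hx : p x = true <;> simp [hx] <;> omega

-- two distinct failing elements of a Nodup list bound countP by length - 2
theorem pv_two_not (l : List Nat) (p : Nat → Bool) (i k : Nat) (hnd : l.Nodup)
    (hi : i ∈ l) (hk : k ∈ l) (hik : i ≠ k) (hpi : p i = false) (hpk : p k = false) :
    l.countP p + 2 ≤ l.length := by
  have h1 := pv_countP_not l p
  have h2 : 2 ≤ l.countP (fun x => !(p x)) := by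
    have hfi : i ∈ l.filter (fun x => !(p x)) := List.mem_filter.mpr ⟨hi, by simp [hpi]⟩
    have hfk : k ∈ l.filter (fun x => !(p x)) := List.mem_filter.mpr ⟨hk, by simp [hpk]⟩
    have hnd' : (l.filter (fun x => !(p x))).Nodup := hnd.filter _
    have hsub : ({i, k} : Finset Nat) ⊆ (l.filter (fun x => !(p x))).toFinset := by
      intro x hx
      rcases Finset.mem_insert.mp hx with h | h
      · subst h; exact List.mem_toFinset.mpr hfi
      · rw [Finset.mem_singleton] at h; subst h; exact List.mem_toFinset.mpr hfk
    calc 2 = ({i, k} : Finset Nat).card := (Finset.card_pair hik).symm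
      _ ≤ (l.filter (fun x => !(p x))).toFinset.card := Finset.card_le_card hsub
      _ ≤ (l.filter (fun x => !(p x))).length := (l.filter _).toFinset_card_le
      _ = l.countP (fun x => !(p x)) := (List.countP_eq_length_filter (p := fun x => !(p x)) (l := l)).symm
  omega

-- countP = length - 1 with one known failure forces every other element to succeed
theorem pv_all_but_one (l : List Nat) (p : Nat → Bool) (c : Nat) (hnd : l.Nodup)
    (hc : c ∈ l) (hpc : p c = false) (hcount : l.countP p + 1 = l.length) :
    ∀ x ∈ l, x ≠ c → p x = true := by
  intro x hx hxc
  by_contra hpx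
  have := pv_two_not l p x c hnd hx hc hxc (by simpa using hpx) hpc
  omega

-- the eliminated candidate never moves off a person who knows nobody
theorem pv_elim_fix (mat : List (List Int)) (m : Nat) (c : Nat)
    (hc : ∀ j, pvKnows mat m c j = false) (l : List Nat) :
    l.foldl (fun c i => if pvKnows mat m c i then i else c) c = c := by
  induction l with
  | nil => rfl
  | cons x t ih => simp [hc x, ih]

-- elimination reaches a person whom everyone else knows and who knows nobody
theorem pv_elim_reach (mat : List (List Int)) (m : Nat) (c : Nat)
    (hc : ∀ j, pvKnows mat m c j = false) (l : List Nat) (c₀ : Nat)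
    (hall : ∀ r ∈ c₀ :: l, r ≠ c → pvKnows mat m r c = true)
    (hin : c ∈ l ∨ c₀ = c) :
    l.foldl (fun c i => if pvKnows mat m c i then i else c) c₀ = c := by
  induction l generalizing c₀ with
  | nil =>
    rcases hin with h | h
    · exact absurd h List.not_mem_nil
    · simpa using h
  | cons x t ih =>
    rw [List.foldl_cons]
    by_cases h0 : c₀ = c
    · subst h0
      rw [if_neg (by simp [hc x])]
      exact pv_elim_fix mat m c₀ hc t
    · have hcxt : c ∈ x :: t := by
        rcases hin with h | h
        · exact h
        · exact absurd h h0
      by_cases hx : x = c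
      · subst hx
        rw [if_pos (hall c₀ List.mem_cons_self h0)]
        exact pv_elim_fix mat m x hc t
      · have hct : c ∈ t := by
          rcases List.mem_cons.mp hcxt with h | h
          · exact absurd h.symm hx
          · exact h
        by_cases hs : pvKnows mat m c₀ x = true
        · rw [if_pos hs]
          exact ih x (fun r hr hrc => hall r (by
            rcases List.mem_cons.mp hr with h | h
            · exact h ▸ List.mem_cons_of_mem _ List.mem_cons_self
            · exact List.mem_cons_of_mem _ (List.mem_cons_of_mem _ h)) hrc) (Or.inl hct)
        · rw [if_neg hs]
          exact ih c₀ (fun r hr hrc => hall r (by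
            rcases List.mem_cons.mp hr with h | h
            · exact h ▸ List.mem_cons_self
            · exact List.mem_cons_of_mem _ (List.mem_cons_of_mem _ h)) hrc) (Or.inl hct)

-- the eliminated candidate is the start or one of the scanned indices
theorem pv_elim_mem (mat : List (List Int)) (m : Nat) (l : List Nat) (c₀ : Nat) :
    l.foldl (fun c i => if pvKnows mat m c i then i else c) c₀ ∈ c₀ :: l := by
  induction l generalizing c₀ with
  | nil => exact List.mem_cons_self
  | cons x t ih =>
    rw [List.foldl_cons]
    by_cases hs : pvKnows mat m c₀ x = true
    · rw [if_pos hs]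
      rcases List.mem_cons.mp (ih x) with h | h
      · rw [h]; exact List.mem_cons_of_mem _ List.mem_cons_self
      · exact List.mem_cons_of_mem _ (List.mem_cons_of_mem _ h)
    · rw [if_neg hs]
      rcases List.mem_cons.mp (ih c₀) with h | h
      · rw [h]; exact List.mem_cons_self
      · exact List.mem_cons_of_mem _ (List.mem_cons_of_mem _ h)

-- at most one person can be a celebrity
theorem pv_unique (mat : List (List Int)) (M i k : Nat)
    (hi : i < mat.length) (hk : k < mat.length)
    (hCi : pvIsC mat M i = true) (hCk : pvIsC mat M k = true)
    (hcnti : (pvCnt mat M i : Int) = (mat.length : Int) - 1) : i = k := by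
  by_contra hik
  have hki : pvKnows mat M i i = false := (pvIsC_iff mat M i).mp hCi i
  have hkk : pvKnows mat M k i = false := (pvIsC_iff mat M k).mp hCk i
  have h2 := pv_two_not (List.range mat.length) (fun r => pvKnows mat M r i) i k
    List.nodup_range (List.mem_range.mpr hi) (List.mem_range.mpr hk) hik hki hkk
  have hlen : (List.range mat.length).length = mat.length := List.length_range
  unfold pvCnt at hcnti
  omega

-- ===== VERDICT (by name: the statement is the Claim_ definition above) =====
-- closed form of port A
theorem pv_A_closed (mat : List (List Int)) :
    get_celebrity_in_party mat
    = (match ((List.range mat.length).filter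
          (fun i => pvIsC mat ((PySem.List.pyGet? mat 0).getD []).length i)).find?
          (fun i => decide ((pvCnt mat ((PySem.List.pyGet? mat 0).getD []).length i : Int)
            = (mat.length : Int) - 1)) with
       | some i => (i : Int)
       | none => -1) := by
  show pvScanCelebs
      ((List.range mat.length).foldl
        (fun (st : PySem.Dict Int Int × List Int) i =>
          let row := mat.getD i []
          let inner := (List.range ((PySem.List.pyGet? mat 0).getD []).length).foldl
            (fun (st2 : PySem.Dict Int Int × Int) j =>
              if row.getD j 0 == 1 then (st2.1.modify (j : Int) 0 (· + 1), st2.2 + 1) else st2)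
            (st.1, (0 : Int))
          if inner.2 = 0 then (inner.1, st.2 ++ [(i : Int)]) else (inner.1, st.2))
        (PySem.Dict.empty, [])).1 (mat.length : Int)
      ((List.range mat.length).foldl
        (fun (st : PySem.Dict Int Int × List Int) i =>
          let row := mat.getD i []
          let inner := (List.range ((PySem.List.pyGet? mat 0).getD []).length).foldl
            (fun (st2 : PySem.Dict Int Int × Int) j =>
              if row.getD j 0 == 1 then (st2.1.modify (j : Int) 0 (· + 1), st2.2 + 1) else st2)
            (st.1, (0 : Int))
          if inner.2 = 0 then (inner.1, st.2 ++ [(i : Int)]) else (inner.1, st.2))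
        (PySem.Dict.empty, [])).2
    = _
  rw [(pv_outer mat ((PySem.List.pyGet? mat 0).getD []).length (List.range mat.length)
        PySem.Dict.empty []).2, List.nil_append]
  rw [pv_scan _ _ _
    (fun i => (pvCnt mat ((PySem.List.pyGet? mat 0).getD []).length i : Int))
    (fun x _ => by
      have hx := (pv_outer mat ((PySem.List.pyGet? mat 0).getD []).length (List.range mat.length)
          PySem.Dict.empty []).1 x
      rw [PySem.Dict.getD_empty, zero_add] at hx
      rw [hx]
      rfl)]

theorem get_celebrity_in_party_spec : Claim_equal_get_celebrity_in_party := by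
  intro mat _ _
  by_cases hne : mat = []
  · subst hne; rfl
  have hn1 : 0 < mat.length := List.length_pos_iff.mpr hne
  unfold Spec_get_celebrity_in_party
  rw [pv_A_closed]
  show _ = (if ((List.range ((PySem.List.pyGet? mat 0).getD []).length).any
        (fun j => pvKnows mat ((PySem.List.pyGet? mat 0).getD []).length
          ((List.range' 1 (mat.length - 1)).foldl
            (fun c i => if pvKnows mat ((PySem.List.pyGet? mat 0).getD []).length c i then i else c) 0) j))
      then (-1 : Int)
      else if ((List.range mat.length).countP
            (fun r => pvKnows mat ((PySem.List.pyGet? mat 0).getD []).length r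
              ((List.range' 1 (mat.length - 1)).foldl
                (fun c i => if pvKnows mat ((PySem.List.pyGet? mat 0).getD []).length c i then i else c) 0)) : Int)
          ≠ (mat.length : Int) - 1 then (-1 : Int)
      else (((List.range' 1 (mat.length - 1)).foldl
          (fun c i => if pvKnows mat ((PySem.List.pyGet? mat 0).getD []).length c i then i else c) 0 : Nat) : Int))
  set M := ((PySem.List.pyGet? mat 0).getD []).length with hM
  set cand := (List.range' 1 (mat.length - 1)).foldl
    (fun c i => if pvKnows mat M c i then i else c) 0 with hcanddef
  by_cases hex : ∃ c, c < mat.length ∧ pvIsC mat M c = true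
      ∧ (pvCnt mat M c : Int) = (mat.length : Int) - 1
  · obtain ⟨c, hcn, hcC, hcCnt⟩ := hex
    have hcK : ∀ j, pvKnows mat M c j = false := (pvIsC_iff mat M c).mp hcC
    have hcntNat : (List.range mat.length).countP (fun r => pvKnows mat M r c) + 1
        = (List.range mat.length).length := by
      unfold pvCnt at hcCnt
      have := List.length_range (n := mat.length)
      omega
    have hall : ∀ x ∈ List.range mat.length, x ≠ c → pvKnows mat M x c = true :=
      pv_all_but_one _ _ c List.nodup_range (List.mem_range.mpr hcn) (hcK c) hcntNat
    have hcand : cand = c := by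
      rw [hcanddef]
      refine pv_elim_reach mat M c hcK _ 0 (fun r hr hrc => ?_) ?_
      · refine hall r (List.mem_range.mpr ?_) hrc
        rcases List.mem_cons.mp hr with h | h
        · omega
        · have := List.mem_range'_1.mp h
          omega
      · by_cases hc0 : c = 0
        · exact Or.inr hc0.symm
        · exact Or.inl (List.mem_range'_1.mpr (by omega))
    have hAfind : ((List.range mat.length).filter (fun i => pvIsC mat M i)).find?
        (fun i => decide ((pvCnt mat M i : Int) = (mat.length : Int) - 1)) = some c := by
      cases hfind : ((List.range mat.length).filter (fun i => pvIsC mat M i)).find?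
          (fun i => decide ((pvCnt mat M i : Int) = (mat.length : Int) - 1)) with
      | none =>
        exfalso
        have := List.find?_eq_none.mp hfind c
          (List.mem_filter.mpr ⟨List.mem_range.mpr hcn, hcC⟩)
        simp [hcCnt] at this
      | some y =>
        have hy1 := List.find?_some hfind
        have hy2 := List.mem_of_find?_eq_some hfind
        rcases List.mem_filter.mp hy2 with ⟨hyr, hyC⟩
        have hyc : y = c := pv_unique mat M y c (List.mem_range.mp hyr) hcn hyC hcC
          (by simpa using hy1)
        exact congrArg some hyc
    rw [hAfind, hcand]
    rw [if_neg (by simp [hcK]), if_neg (by unfold pvCnt at hcCnt; simpa using hcCnt)]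
  · have hAfind : ((List.range mat.length).filter (fun i => pvIsC mat M i)).find?
        (fun i => decide ((pvCnt mat M i : Int) = (mat.length : Int) - 1)) = none := by
      cases hfind : ((List.range mat.length).filter (fun i => pvIsC mat M i)).find?
          (fun i => decide ((pvCnt mat M i : Int) = (mat.length : Int) - 1)) with
      | none => rfl
      | some y =>
        exfalso
        have hy1 := List.find?_some hfind
        have hy2 := List.mem_of_find?_eq_some hfind
        rcases List.mem_filter.mp hy2 with ⟨hyr, hyC⟩
        exact hex ⟨y, List.mem_range.mp hyr, hyC, by simpa using hy1⟩
    rw [hAfind]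
    have hcandlt : cand < mat.length := by
      rcases List.mem_cons.mp (pv_elim_mem mat M (List.range' 1 (mat.length - 1)) 0) with h | h
      · rw [hcanddef, h]; omega
      · have := List.mem_range'_1.mp h
        rw [hcanddef]
        omega
    by_cases g1 : (List.range M).any (fun j => pvKnows mat M cand j) = true
    · rw [if_pos g1]
    · rw [if_neg (by simpa using g1)]
      have hCc : pvIsC mat M cand = true := by
        refine (pvIsC_iff mat M cand).mpr (fun j => ?_)
        by_cases hj : j < M
        · have := List.any_eq_false.mp (by simpa using g1) j (List.mem_range.mpr hj)
          simpa using this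
        · simp [pvKnows, hj]
      by_cases g2 : ((List.range mat.length).countP (fun r => pvKnows mat M r cand) : Int)
          ≠ (mat.length : Int) - 1
      · rw [if_pos g2]
      · exfalso
        exact hex ⟨cand, hcandlt, hCc, by unfold pvCnt; simpa using g2⟩
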